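-- pv_equiv track=rewrite | github.com/codeit-bootcamp-frontend/0-study-algorithms | 프로그래머스/2/42860. 조이스틱/조이스틱.py | solution
-- ===== SOURCE A (Python) =====
-- def cal_num_mani_str(s1, s2):
--     s1_ord = ord(s1)
--     s2_ord = ord(s2)
--     return min(s2_ord - s1_ord, s1_ord + 26 - s2_ord)
--
-- def solution(name):
--     answer = 0
--     a_list = []
--     length = len(name)
--     move_pos_num = length - 1
--     change_str_num = 0
--
--     # a가 들어있는 위치를 리스트로 도출
--     is_before_a = False
--     for i, s in enumerate(name):
--         if i == 0:
--             continue
--         if s == "A":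
--             if not is_before_a:
--                 is_before_a = True
--                 a_list.append([i])
--             else:
--                 continue
--         else:
--             if not is_before_a:
--                 continue
--             else:
--                 a_list[-1].append(i-1)
--             is_before_a = False
--
--     if a_list and len(a_list[-1]) == 1:
--         a_list[-1].append(-1)
--
--     # 아래 3 경우의 이동 횟수 중 최소를 계산
--     # 1. a 상관 없이 한 방향으로 계속 이동
--     # 2. 특정 a 덩어리를 통과하지 않을 때
--     # 2-1. a 덩어리 왼쪽 이동 후 오른쪽으로 돌아가기
--     # 2-2. a 덩어리 오른 쪽 이동 후 왼쪽으로 돌아가기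
--     for s, e in a_list:
--         if s == 1 and e == -1:
--             move_pos_num = 0
--             break
--         elif s == 1:
--             move_pos_num = min(move_pos_num, length - e - 1)
--         elif e == -1:
--             move_pos_num = min(move_pos_num, s - 1)
--         else:
--             left_dir = (s - 1) + (length - (e - s) - 2)
--             right_dir = (length - e - 1) + (length - (e - s) - 2)
--             move_pos_num = min(move_pos_num, min(left_dir, right_dir))
--
--     # 각 문자를 A에서 조작할 때 필요한 횟수의 합 계산
--     for s in name:
--         change_str_num += cal_num_mani_str("A", s)
--     # 조작할 문자로 이동하는 횟수 + 각 문자 조작 횟수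
--     return move_pos_num + change_str_num
-- ===== SOURCE B (Python) =====
-- def solution(name):
--     n = len(name)
--     total = 0
--     best = n - 1
--     q = 0
--     for i, c in enumerate(name):
--         total += min(ord(c) - 65, 91 - ord(c))
--         if i > 0 and c != 'A':
--             best = min(best, 2*q + (n - i), q + 2*(n - i))
--             q = i
--     return min(best, 2*q, q) + total
-- ===== Notes on version B (the rewrite author's own statement) =====
-- stated objective: simpler
-- what changed: A builds an explicit list of 'A'-run [start,end] blocks (stateful scan, append-to-last, a -1 patch, then a three-case minimum loop over the blocks); B is one fused pass over enumerate(name) that keeps only the running letter-cost total, the best move count, and the last non-'A' index.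
import Mathlib
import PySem

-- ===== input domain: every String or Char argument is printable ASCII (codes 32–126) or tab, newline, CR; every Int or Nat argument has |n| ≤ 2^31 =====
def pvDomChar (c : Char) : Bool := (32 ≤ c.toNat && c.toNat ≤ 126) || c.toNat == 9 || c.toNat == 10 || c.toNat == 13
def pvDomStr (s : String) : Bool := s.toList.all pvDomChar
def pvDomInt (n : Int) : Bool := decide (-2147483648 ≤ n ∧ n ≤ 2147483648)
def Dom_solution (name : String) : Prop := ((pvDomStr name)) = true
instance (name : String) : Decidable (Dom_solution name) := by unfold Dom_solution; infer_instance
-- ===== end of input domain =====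

-- B replaces A's explicit 'A'-run list (build, patch, three-case minimum loop) by one fused
-- left-to-right pass keeping only (total, best, last-non-'A' index); objective: simpler.

-- ===== PORT A =====
def calNumManiStr (s1 s2 : Char) : Int :=
  min ((s2.toNat : Int) - (s1.toNat : Int)) ((s1.toNat : Int) + 26 - (s2.toNat : Int))

-- Python a_list[-1].append(x)
def pyModifyLast : List (List Int) → Int → List (List Int)
  | [], _ => []
  | [a], x => [a ++ [x]]
  | a :: b :: r, x => a :: pyModifyLast (b :: r) x

-- the 'for i, s in enumerate(name)' loop building a_list with state is_before_a
def parseA : List Char → Nat → List (List Int) → Bool → List (List Int) × Bool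
  | [], _, al, b => (al, b)
  | c :: rest, i, al, b =>
    if i = 0 then parseA rest (i+1) al b
    else if c = 'A' then
      (if b then parseA rest (i+1) al b
       else parseA rest (i+1) (al ++ [[(i : Int)]]) true)
    else
      (if b then parseA rest (i+1) (pyModifyLast al ((i : Int) - 1)) false
       else parseA rest (i+1) al b)

-- 'if a_list and len(a_list[-1]) == 1: a_list[-1].append(-1)'
def patchA (al : List (List Int)) : List (List Int) :=
  match al.getLast? with
  | none => al
  | some l => if l.length = 1 then pyModifyLast al (-1) else al

-- 'for s, e in a_list: …' with the break; non-pair runs never occur (Python would raise)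
def loopRuns : List (List Int) → Int → Int → Int
  | [], _, m => m
  | run :: rest, len, m =>
    match run with
    | [s, e] =>
      if s = 1 ∧ e = -1 then 0
      else if s = 1 then loopRuns rest len (min m (len - e - 1))
      else if e = -1 then loopRuns rest len (min m (s - 1))
      else loopRuns rest len
        (min m (min ((s - 1) + (len - (e - s) - 2)) ((len - e - 1) + (len - (e - s) - 2))))
    | _ => loopRuns rest len m

-- 'for s in name: change_str_num += cal_num_mani_str("A", s)'
def vertGo : List Char → Int → Int
  | [], t => t
  | c :: r, t => vertGo r (t + calNumManiStr 'A' c)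

def solution (name : String) : Int :=
  let cs := name.toList
  let length : Int := (cs.length : Int)
  let al := patchA (parseA cs 0 [] false).1
  loopRuns al length (length - 1) + vertGo cs 0

-- ===== PORT B =====
-- the single 'for i, c in enumerate(name)' pass of Source B, state (total, best, q)
def solAltGo (n : Int) : List Char → Nat → Int → Int → Int → Int × Int × Int
  | [], _, t, best, q => (t, best, q)
  | c :: rest, i, t, best, q =>
    let t' := t + min ((c.toNat : Int) - 65) (91 - (c.toNat : Int))
    if 0 < i ∧ c ≠ 'A' then
      solAltGo n rest (i+1) t'
        (min (min best (2*q + (n - (i : Int)))) (q + 2*(n - (i : Int)))) (i : Int)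
    else solAltGo n rest (i+1) t' best q

def solution_alt (name : String) : Int :=
  let cs := name.toList
  let n : Int := (cs.length : Int)
  let r := solAltGo n cs 0 0 (n - 1) 0
  min (min r.2.1 (2 * r.2.2)) r.2.2 + r.1

-- ===== PRECONDITION & SPEC =====
def Spec_solution (name : String) (out : Int) : Prop := out = solution_alt name
instance (name : String) (out : Int) : Decidable (Spec_solution name out) := by unfold Spec_solution; infer_instance

-- ===== CLAIM (what is proved, stated in full; the proofs are below) =====
def Claim_equal_solution : Prop := ∀ (name : String), Dom_solution name → Spec_solution name (solution name)

-- ===== LEMMAS AND PROOFS =====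

-- pure characterisation of A's parser output: o = start of the currently open 'A'-run (if any)
def runsO : Option Int → List Char → Nat → List (List Int)
  | none, [], _ => []
  | some s, [], _ => [[s, -1]]
  | none, c :: t, i => if c = 'A' then runsO (some (i : Int)) t (i+1) else runsO none t (i+1)
  | some s, c :: t, i => if c = 'A' then runsO (some s) t (i+1) else [s, (i : Int) - 1] :: runsO none t (i+1)

def qOf : Option Int → Nat → Int
  | none, i => (i : Int) - 1
  | some s, _ => s - 1

def costRun (len : Int) (r : List Int) : Int :=
  match r with
  | [s, e] =>
    if s = 1 ∧ e = -1 then 0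
    else if s = 1 then len - e - 1
    else if e = -1 then s - 1
    else min ((s - 1) + (len - (e - s) - 2)) ((len - e - 1) + (len - (e - s) - 2))
  | _ => 0

def wfRun (len : Int) (r : List Int) : Prop :=
  ∃ s e, r = [s, e] ∧ 1 ≤ s ∧ (e = -1 ∨ (s ≤ e ∧ e ≤ len - 2))

-- B's loop without the total component
def hGo (n : Int) : List Char → Nat → Int → Int → Int × Int
  | [], _, best, q => (best, q)
  | c :: rest, i, best, q =>
    if 0 < i ∧ c ≠ 'A' then
      hGo n rest (i+1) (min (min best (2*q + (n - (i : Int)))) (q + 2*(n - (i : Int)))) (i : Int)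
    else hGo n rest (i+1) best q

def hFin (n : Int) (rest : List Char) (i : Nat) (best q : Int) : Int :=
  min (min (hGo n rest i best q).1 (2 * (hGo n rest i best q).2)) (hGo n rest i best q).2

theorem pyModifyLast_append (al al' : List (List Int)) (x : Int) (h : al' ≠ []) :
    pyModifyLast (al ++ al') x = al ++ pyModifyLast al' x := by
  induction al with
  | nil => rfl
  | cons a as ih =>
    cases has : as ++ al' with
    | nil => exact absurd (List.append_eq_nil_iff.mp has).2 h
    | cons y ys =>
      have h2 : pyModifyLast (a :: (as ++ al')) x = a :: pyModifyLast (as ++ al') x := by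
        rw [has]; rfl
      rw [List.cons_append, h2, ih, List.cons_append]

theorem parseA_append (rest : List Char) :
    ∀ (i : Nat) (al al' : List (List Int)) (b : Bool), (b = true → al' ≠ []) →
    parseA rest i (al ++ al') b = ((al ++ (parseA rest i al' b).1, (parseA rest i al' b).2)) := by
  induction rest with
  | nil => intro i al al' b _; rfl
  | cons c t ih =>
    intro i al al' b hb
    by_cases hi : i = 0
    · simp only [parseA, if_pos hi]; exact ih (i+1) al al' b hb
    · by_cases hc : c = 'A'
      · cases b with
        | true =>
          simp only [parseA, if_neg hi, if_pos hc]
          simp only [if_true, if_pos rfl]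
          exact ih (i+1) al al' true hb
        | false =>
          simp only [parseA, if_neg hi, if_pos hc]
          simp only [show ((false = true) = False) from by simp, if_false]
          rw [List.append_assoc]
          exact ih (i+1) al (al' ++ [[(i : Int)]]) true (fun _ => by simp)
      · cases b with
        | true =>
          simp only [parseA, if_neg hi, if_neg hc]
          simp only [if_true, if_pos rfl]
          rw [pyModifyLast_append al al' _ (hb rfl)]
          exact ih (i+1) al (pyModifyLast al' ((i:Int)-1)) false (by simp)
        | false =>
          simp only [parseA, if_neg hi, if_neg hc]
          simp only [show ((false = true) = False) from by simp, if_false]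
          exact ih (i+1) al al' false (by simp)

theorem patchA_pair_cons (s e : Int) (Y : List (List Int)) :
    patchA ([s, e] :: Y) = [s, e] :: patchA Y := by
  cases Y with
  | nil => rfl
  | cons y ys =>
    unfold patchA
    rw [show ([s,e] :: y :: ys).getLast? = (y :: ys).getLast? from List.getLast?_cons_cons ..]
    cases h : (y :: ys).getLast? with
    | none => simp at h
    | some l =>
      by_cases hl : l.length = 1
      · simp only [if_pos hl]
        exact pyModifyLast_append [[s,e]] (y :: ys) (-1) (by simp)
      · simp [hl]

-- A's parser, parsed from state (al = [], closed) or (al = [[s]], open), then patched,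
-- equals the pure run list
theorem parse_char (rest : List Char) :
    ∀ (i : Nat), 1 ≤ i →
      (patchA (parseA rest i [] false).1 = runsO none rest i ∧
       ∀ s : Int, patchA (parseA rest i [[s]] true).1 = runsO (some s) rest i) := by
  induction rest with
  | nil =>
    intro i _
    exact ⟨rfl, fun s => rfl⟩
  | cons c t ih =>
    intro i hi
    have hi0 : ¬ (i = 0) := by omega
    obtain ⟨ih1, ih2⟩ := ih (i+1) (by omega)
    by_cases hc : c = 'A'
    · constructor
      · have e1 : parseA (c :: t) i [] false = parseA t (i+1) [[(i:Int)]] true := by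
          simp [parseA, hi0, hc]
        rw [e1, ih2]
        simp [runsO, hc]
      · intro s
        have e1 : parseA (c :: t) i [[s]] true = parseA t (i+1) [[s]] true := by
          simp [parseA, hi0, hc]
        rw [e1, ih2]
        simp [runsO, hc]
    · constructor
      · have e1 : parseA (c :: t) i [] false = parseA t (i+1) [] false := by
          simp [parseA, hi0, hc]
        rw [e1, ih1]
        simp [runsO, hc]
      · intro s
        have aux := parseA_append t (i+1) [[s, (i:Int)-1]] [] false (by simp)
        simp only [List.append_nil] at aux
        have e1 : parseA (c :: t) i [[s]] true
            = ([[s, (i:Int)-1]] ++ (parseA t (i+1) [] false).1, (parseA t (i+1) [] false).2) := by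
          have e0 : pyModifyLast [[s]] ((i:Int) - 1) = [[s, (i:Int)-1]] := rfl
          simp [parseA, hi0, hc, e0, aux]
        rw [e1]
        simp only [List.singleton_append]
        rw [patchA_pair_cons, ih1]
        simp [runsO, hc]

theorem costRun_nonneg (len : Int) (r : List Int) (h : wfRun len r) : 0 ≤ costRun len r := by
  obtain ⟨s, e, rfl, hs, he⟩ := h
  simp only [costRun]
  split_ifs <;> omega

theorem foldl_min_zero (len : Int) (rs : List (List Int))
    (h : ∀ r ∈ rs, wfRun len r) :
    rs.foldl (fun a r => min a (costRun len r)) 0 = 0 := by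
  induction rs with
  | nil => rfl
  | cons r rest ih =>
    have h0 := costRun_nonneg len r (h r (by simp))
    simp only [List.foldl_cons, show min 0 (costRun len r) = 0 by omega]
    exact ih (fun r hr => h r (by simp [hr]))

theorem loopRuns_eq_foldl (rs : List (List Int)) :
    ∀ (len m : Int), (∀ r ∈ rs, wfRun len r) → 0 ≤ m →
    loopRuns rs len m = rs.foldl (fun a r => min a (costRun len r)) m := by
  induction rs with
  | nil => intro len m _ _; rfl
  | cons r rest ih =>
    intro len m h hm
    obtain ⟨s, e, hre, hs, he⟩ := h r (by simp)
    subst hre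
    have hrest : ∀ r ∈ rest, wfRun len r := fun r hr => h r (by simp [hr])
    by_cases h1 : s = 1 ∧ e = -1
    · simp only [loopRuns, if_pos h1, List.foldl_cons, costRun, if_pos h1,
        show min m 0 = 0 by omega]
      exact (foldl_min_zero len rest hrest).symm
    · have hcost : 0 ≤ costRun len [s, e] := costRun_nonneg len [s,e] ⟨s, e, rfl, hs, he⟩
      have hstep : loopRuns ([s,e] :: rest) len m = loopRuns rest len (min m (costRun len [s,e])) := by
        simp only [loopRuns, costRun, if_neg h1]
        split_ifs <;> rfl
      rw [hstep, List.foldl_cons]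
      exact ih len _ hrest (by omega)

theorem runsO_wf (rest : List Char) :
    ∀ (len : Int) (i : Nat) (o : Option Int), (i : Int) + rest.length = len → 1 ≤ i →
    (∀ s, o = some s → 1 ≤ s ∧ s < (i : Int)) →
    ∀ r ∈ runsO o rest i, wfRun len r := by
  induction rest with
  | nil =>
    intro len i o hlen hi ho r hr
    cases o with
    | none => simp [runsO] at hr
    | some s =>
      simp only [runsO, List.mem_singleton] at hr
      subst hr
      exact ⟨s, -1, rfl, (ho s rfl).1, Or.inl rfl⟩
  | cons c t ih =>
    intro len i o hlen hi ho r hr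
    simp only [List.length_cons] at hlen
    cases o with
    | none =>
      by_cases hc : c = 'A'
      · exact ih len (i+1) (some (i:Int)) (by push_cast; push_cast at hlen; omega) (by omega)
          (by intro s hs; injection hs with hs; omega) r (by simpa [runsO, hc] using hr)
      · exact ih len (i+1) none (by push_cast; push_cast at hlen; omega) (by omega) (by simp) r
          (by simpa [runsO, hc] using hr)
    | some s =>
      by_cases hc : c = 'A'
      · exact ih len (i+1) (some s) (by push_cast; push_cast at hlen; omega) (by omega)
          (by intro s' hs'; injection hs' with hs'; have := ho s rfl; omega) r
          (by simpa [runsO, hc] using hr)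
      · simp only [runsO, if_neg hc, List.mem_cons] at hr
        rcases hr with rfl | hr
        · have hso := ho s rfl
          exact ⟨s, (i:Int) - 1, rfl, hso.1, Or.inr ⟨by omega, by push_cast at hlen; omega⟩⟩
        · exact ih len (i+1) none (by push_cast; push_cast at hlen; omega) (by omega) (by simp) r hr

theorem calNum_eq (c : Char) :
    calNumManiStr 'A' c = min ((c.toNat : Int) - 65) (91 - (c.toNat : Int)) := by
  have h : 'A'.toNat = 65 := by decide
  simp only [calNumManiStr, h]
  norm_num

theorem solAltGo_split (n : Int) (rest : List Char) :
    ∀ (i : Nat) (t best q : Int),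
    solAltGo n rest i t best q = (vertGo rest t, hGo n rest i best q) := by
  induction rest with
  | nil => intro i t best q; rfl
  | cons c cs ih =>
    intro i t best q
    simp only [solAltGo, hGo, vertGo, calNum_eq]
    by_cases h : 0 < i ∧ c ≠ 'A'
    · simp only [if_pos h, ih]
    · simp only [if_neg h, ih]

theorem hFin_cons (n : Int) (c : Char) (t : List Char) (i : Nat) (m q : Int) :
    hFin n (c :: t) i m q =
      if 0 < i ∧ c ≠ 'A' then
        hFin n t (i+1) (min (min m (2*q + (n - (i:Int)))) (q + 2*(n - (i:Int)))) (i:Int)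
      else hFin n t (i+1) m q := by
  by_cases h : 0 < i ∧ c ≠ 'A' <;> simp [hFin, hGo, h]

-- the crux: A's minimum over runs equals B's fused minimum
theorem main_sim (n : Int) (rest : List Char) :
    ∀ (i : Nat) (m : Int) (o : Option Int),
    (i : Int) + rest.length = n → 1 ≤ i → 0 ≤ m → m ≤ n - 1 →
    (∀ s, o = some s → 1 ≤ s ∧ s < (i : Int)) →
    (runsO o rest i).foldl (fun a r => min a (costRun n r)) m = hFin n rest i m (qOf o i) := by
  induction rest with
  | nil =>
    intro i m o hlen hi hm0 hm1 ho
    have hlen' : (i : Int) = n := by simpa using hlen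
    cases o with
    | none =>
      rw [show runsO none [] i = [] from rfl, List.foldl_nil,
        show hFin n [] i m (qOf none i) = min (min m (2*((i:Int)-1))) ((i:Int)-1) from rfl]
      omega
    | some s =>
      have hso := ho s rfl
      have hc : costRun n [s, -1] = s - 1 := by
        simp only [costRun]; norm_num; split_ifs <;> omega
      rw [show runsO (some s) [] i = [[s, -1]] from rfl, List.foldl_cons, List.foldl_nil]
      show min m (costRun n [s, -1]) = hFin n [] i m (qOf (some s) i)
      rw [hc, show hFin n [] i m (qOf (some s) i) = min (min m (2*(s-1))) (s-1) from rfl]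
      omega
  | cons c t ihh =>
    intro i m o hlen hi hm0 hm1 ho
    simp only [List.length_cons] at hlen
    push_cast at hlen
    rw [hFin_cons]
    cases o with
    | none =>
      by_cases hc : c = 'A'
      · rw [if_neg (by simp [hc]),
          show runsO none (c::t) i = runsO (some (i:Int)) t (i+1) from by simp [runsO, hc]]
        have IH := ihh (i+1) m (some (i:Int)) (by push_cast; omega) (by omega) hm0 hm1
          (fun s hs => by injection hs with hs; omega)
        rw [IH]
        simp [qOf]
      · rw [if_pos ⟨by omega, hc⟩,
          show runsO none (c::t) i = runsO none t (i+1) from by simp [runsO, hc]]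
        simp only [qOf]
        have hq : min (min m (2*((i:Int)-1) + (n - (i:Int)))) (((i:Int)-1) + 2*(n - (i:Int))) = m := by
          omega
        rw [hq]
        have IH := ihh (i+1) m none (by push_cast; omega) (by omega) hm0 hm1 (by simp)
        rw [IH]
        simp only [qOf]
        congr 1
        push_cast
        ring
    | some s =>
      have hso := ho s rfl
      by_cases hc : c = 'A'
      · rw [if_neg (by simp [hc]),
          show runsO (some s) (c::t) i = runsO (some s) t (i+1) from by simp [runsO, hc]]
        have IH := ihh (i+1) m (some s) (by push_cast; omega) (by omega) hm0 hm1
          (by intro s' hs'; injection hs' with hs'; omega)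
        rw [IH]
        simp [qOf]
      · rw [if_pos ⟨by omega, hc⟩,
          show runsO (some s) (c::t) i = [s, (i:Int)-1] :: runsO none t (i+1) from by
            simp [runsO, hc]]
        rw [List.foldl_cons]
        have hcost : min m (costRun n [s, (i:Int)-1]) =
            min (min m (2*(s-1) + (n - (i:Int)))) ((s-1) + 2*(n - (i:Int))) := by
          simp only [costRun]; norm_num; split_ifs <;> omega
        rw [hcost]
        have IH := ihh (i+1) (min (min m (2*(s-1) + (n - (i:Int)))) ((s-1) + 2*(n - (i:Int)))) none
          (by push_cast; omega) (by omega) (by omega) (by omega) (by simp)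
        rw [IH]
        simp only [qOf]
        congr 1
        push_cast
        ring

-- ===== VERDICT (by name: the statement is the Claim_ definition above) =====
theorem solution_spec : Claim_equal_solution := by
  intro name _
  simp only [Spec_solution, solution, solution_alt]
  cases h : name.toList with
  | nil => simp [parseA, patchA, loopRuns, vertGo, solAltGo]
  | cons c t =>
    set n : Int := ((c :: t).length : Int) with hndef
    have hn : n = (t.length : Int) + 1 := by rw [hndef]; push_cast [List.length_cons]; ring
    have hA1 : parseA (c :: t) 0 [] false = parseA t 1 [] false := by
      simp [parseA]
    have hA2 : patchA (parseA t 1 [] false).1 = runsO none t 1 := (parse_char t 1 (by omega)).1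
    have hwf : ∀ r ∈ runsO none t 1, wfRun n r :=
      runsO_wf t n 1 none (by push_cast; omega) (by omega) (by simp)
    have hA3 : loopRuns (runsO none t 1) n (n - 1) =
        (runsO none t 1).foldl (fun a r => min a (costRun n r)) (n - 1) :=
      loopRuns_eq_foldl (runsO none t 1) n (n-1) hwf (by omega)
    have hA4 := main_sim n t 1 (n - 1) none (by push_cast; omega) (by omega) (by omega)
      (by omega) (by simp)
    have hB1 : solAltGo n (c :: t) 0 0 (n - 1) 0
        = (vertGo t (0 + calNumManiStr 'A' c), hGo n t 1 (n - 1) 0) := by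
      rw [show solAltGo n (c :: t) 0 0 (n-1) 0
          = solAltGo n t 1 (0 + min ((c.toNat:Int) - 65) (91 - (c.toNat:Int))) (n-1) 0 from by
        simp [solAltGo]]
      rw [solAltGo_split n t 1 _ (n-1) 0, calNum_eq]
    rw [hA1, hA2, hA3, hA4, hB1]
    simp only [hFin, qOf, vertGo]
    norm_num
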